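-- pv_equiv track=rewrite | github.com/lewesmint/snmpmore | app/snmp_agent.py | _find_table_related_objects
-- ===== SOURCE A (Python) =====
-- from typing import Any, Dict, Optional
--
-- def _find_table_related_objects(mib_json: Dict[str, Any]) -> set[str]:
--     """Return set of table-related object names (tables, entries, columns)."""
--     table_related_objects: set[str] = set()
--     for name, info in mib_json.items():
--         if not isinstance(info, dict):
--             continue
--         if name.endswith('Table') or name.endswith('Entry'):
--             table_related_objects.add(name)
--             if name.endswith('Entry'):
--                 entry_oid = tuple(info.get('oid', []))
--                 # Find all columns that are children of this entry
--                 for col_name, col_info in mib_json.items():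
--                     if not isinstance(col_info, dict):
--                         continue
--                     col_oid = tuple(col_info.get('oid', []))
--                     if (len(col_oid) == len(entry_oid) + 1 and
--                         col_oid[:len(entry_oid)] == entry_oid):
--                         table_related_objects.add(col_name)
--     return table_related_objects
-- ===== SOURCE B (Python) =====
-- from typing import Any, Dict
--
-- def _find_table_related_objects(mib_json: Dict[str, Any]) -> set[str]:
--     """Return set of table-related object names (tables, entries, columns).
--
--     Builds a children index (names keyed by the parent prefix of their OID)
--     in one pass, then expresses the result as a single flat set comprehension
--     over per-object groups: a Table/Entry name contributes itself plus, for an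
--     Entry, the indexed children of its OID. No incremental set, no rescan."""
--     children: Dict[tuple, list] = {}
--     for name, info in mib_json.items():
--         if isinstance(info, dict):
--             oid = tuple(info.get('oid', []))
--             if oid:
--                 children.setdefault(oid[:-1], []).append(name)
--
--     def group(name: str, info: Any) -> list:
--         if not isinstance(info, dict):
--             return []
--         if not (name.endswith('Table') or name.endswith('Entry')):
--             return []
--         cols = children.get(tuple(info.get('oid', [])), []) if name.endswith('Entry') else []
--         return [name] + cols
--
--     return set(x for name, info in mib_json.items() for x in group(name, info))
-- ===== Notes on version B (the rewrite author's own statement) =====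
-- stated objective: alternative
-- what changed: Replaces A's incremental set with nested per-entry rescans by a one-pass children index (names keyed by the parent prefix of their OID) followed by a single flat set comprehension over per-object groups (a Table/Entry name plus, for an Entry, its indexed children); the per-entry rescan and the incremental set both disappear.
import Mathlib
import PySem

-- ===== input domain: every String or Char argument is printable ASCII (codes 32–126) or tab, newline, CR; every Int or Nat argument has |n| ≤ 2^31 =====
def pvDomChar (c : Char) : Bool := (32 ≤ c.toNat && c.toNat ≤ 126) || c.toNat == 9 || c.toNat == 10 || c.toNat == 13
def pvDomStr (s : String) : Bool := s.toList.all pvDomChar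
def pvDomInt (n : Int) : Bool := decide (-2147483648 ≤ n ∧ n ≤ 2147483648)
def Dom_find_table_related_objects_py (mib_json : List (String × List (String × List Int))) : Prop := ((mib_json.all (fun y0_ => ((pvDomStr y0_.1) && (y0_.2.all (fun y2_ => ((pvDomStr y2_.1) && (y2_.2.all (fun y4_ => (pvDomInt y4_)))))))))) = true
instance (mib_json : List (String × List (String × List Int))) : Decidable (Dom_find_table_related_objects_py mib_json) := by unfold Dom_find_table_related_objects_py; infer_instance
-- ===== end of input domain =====

-- B replaces A's incremental set with nested per-entry rescans by a children index
-- (names keyed by the parent prefix of their OID) plus one flat set comprehension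
-- over per-object groups; a different decomposition, not measured faster.

-- ===== PORT A =====
-- inner loop of A: scan every object for children of one entry's oid
def pvAChildScan (items : List (String × PySem.Dict String (List Int))) (entry_oid : List Int) (s : PySem.Set String) : PySem.Set String :=
  items.foldl (fun s q =>
    let col_oid := q.2.getD "oid" []
    -- col_oid[:len(entry_oid)] == entry_oid is exactly List.take with a nonnegative bound
    if col_oid.length == entry_oid.length + 1 && col_oid.take entry_oid.length == entry_oid
    then PySem.Set.add s q.1 else s) s

def find_table_related_objects_py (mib_json : List (String × List (String × List Int))) : List String :=
  -- the Python dicts (outer mib_json and each info) built from the assoc lists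
  let items := (PySem.Dict.ofList (mib_json.map (fun p => (p.1, PySem.Dict.ofList p.2)))).items
  items.foldl (fun s p =>
    if PySem.Str.endswith p.1 "Table" || PySem.Str.endswith p.1 "Entry" then
      let s := PySem.Set.add s p.1
      if PySem.Str.endswith p.1 "Entry" then
        pvAChildScan items (p.2.getD "oid" []) s
      else s
    else s) []

-- ===== PORT B =====
-- grouping pass of B: children.setdefault(oid[:-1], []).append(name)
def pvBChildren (items : List (String × PySem.Dict String (List Int))) : PySem.Dict (List Int) (List String) :=
  items.foldl (fun d q =>
    let oid := q.2.getD "oid" []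
    -- oid[:-1] on a nonempty tuple is exactly List.dropLast
    if oid ≠ [] then d.modify oid.dropLast [] (· ++ [q.1]) else d) PySem.Dict.empty

-- B's group(name, info): the names one object contributes to the flat comprehension
def pvBGroup (children : PySem.Dict (List Int) (List String)) (p : String × PySem.Dict String (List Int)) : List String :=
  if PySem.Str.endswith p.1 "Table" || PySem.Str.endswith p.1 "Entry" then
    p.1 :: (if PySem.Str.endswith p.1 "Entry" then children.getD (p.2.getD "oid" []) [] else [])
  else []

def find_table_related_objects_py_alt (mib_json : List (String × List (String × List Int))) : List String :=
  let items := (PySem.Dict.ofList (mib_json.map (fun p => (p.1, PySem.Dict.ofList p.2)))).items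
  -- set(x for name, info in items for x in group(name, info))
  PySem.Set.ofList (items.flatMap (pvBGroup (pvBChildren items)))

-- ===== PRECONDITION & SPEC =====
def Spec_find_table_related_objects_py (mib_json : List (String × List (String × List Int))) (out : List String) : Prop := out = find_table_related_objects_py_alt mib_json
instance (mib_json : List (String × List (String × List Int))) (out : List String) : Decidable (Spec_find_table_related_objects_py mib_json out) := by unfold Spec_find_table_related_objects_py; infer_instance

-- ===== CLAIM (what is proved, stated in full; the proofs are below) =====
def Claim_equal_find_table_related_objects_py : Prop := ∀ (mib_json : List (String × List (String × List Int))), Dom_find_table_related_objects_py mib_json → Spec_find_table_related_objects_py mib_json (find_table_related_objects_py mib_json)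

-- ===== LEMMAS AND PROOFS =====

-- A's child test on an oid is B's "nonempty and parent prefix" test
lemma pv_cond_iff (oid e : List Int) :
    (oid.length == e.length + 1 && oid.take e.length == e) = (decide (oid ≠ []) && oid.dropLast == e) := by
  rw [Bool.eq_iff_iff]
  simp only [Bool.and_eq_true, beq_iff_eq, decide_eq_true_eq]
  constructor
  · rintro ⟨hl, ht⟩
    have hne : oid ≠ [] := by intro h; subst h; simp at hl
    refine ⟨hne, ?_⟩
    rw [List.dropLast_eq_take, hl]
    simpa using ht
  · rintro ⟨hne, hd⟩
    have hpos : 0 < oid.length := List.length_pos_iff.mpr hne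
    have hlen : oid.dropLast.length = oid.length - 1 := List.length_dropLast
    rw [hd] at hlen
    have hl : oid.length = e.length + 1 := by omega
    refine ⟨hl, ?_⟩
    rw [← hd, List.dropLast_eq_take, hl]
    simp

-- what the grouping dict holds at key e: exactly the names A's inner scan would add, in order
lemma pv_children_getD (items : List (String × PySem.Dict String (List Int))) (e : List Int)
    (d : PySem.Dict (List Int) (List String)) :
    (items.foldl (fun d q =>
        let oid := q.2.getD "oid" []
        if oid ≠ [] then d.modify oid.dropLast [] (· ++ [q.1]) else d) d).getD e []
      = d.getD e [] ++
        ((items.filter (fun q =>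
            let col_oid := q.2.getD "oid" []
            col_oid.length == e.length + 1 && col_oid.take e.length == e)).map (·.1)) := by
  induction items generalizing d with
  | nil => simp
  | cons q rest ih =>
    simp only [List.foldl_cons, List.filter_cons]
    rw [ih, pv_cond_iff]
    by_cases hne : (q.2.getD "oid" []) ≠ []
    · rw [if_pos hne]
      by_cases he : (q.2.getD "oid" []).dropLast = e
      · rw [he, PySem.Dict.getD_modify_self]
        simp [hne]
      · rw [PySem.Dict.getD_modify_of_ne _ _ _ (by simpa using fun h => he h.symm)]
        have : ((q.2.getD "oid" []).dropLast == e) = false := by simpa using he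
        simp [this]
    · rw [if_neg hne]
      simp only [not_not] at hne
      simp [hne]

-- A's inner scan equals a fold of Set.add over the grouped children list
lemma pv_scan_eq (items : List (String × PySem.Dict String (List Int))) (e : List Int)
    (s : PySem.Set String) :
    pvAChildScan items e s = ((pvBChildren items).getD e []).foldl PySem.Set.add s := by
  unfold pvAChildScan pvBChildren
  rw [pv_children_getD]
  simp only [PySem.Dict.getD_empty, List.nil_append]
  rw [List.foldl_map]
  rw [PySem.List.foldl_if_eq_foldl_filter
    (p := fun (q : String × PySem.Dict String (List Int)) =>
      (q.2.getD "oid" []).length == e.length + 1 && (q.2.getD "oid" []).take e.length == e)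
    (f := fun s (q : String × PySem.Dict String (List Int)) => PySem.Set.add s q.1)]

-- folding Set.add over a flatMap is folding the per-element folds
lemma pv_foldl_flatMap {α β : Type} (g : α → List β) [BEq β] (l : List α) (s : PySem.Set β) :
    (l.flatMap g).foldl PySem.Set.add s = l.foldl (fun s x => (g x).foldl PySem.Set.add s) s := by
  induction l generalizing s with
  | nil => rfl
  | cons x rest ih => simp only [List.flatMap_cons, List.foldl_append, List.foldl_cons, ih]

-- ===== VERDICT (by name: the statement is the Claim_ definition above) =====
theorem find_table_related_objects_py_spec : Claim_equal_find_table_related_objects_py := by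
  intro mib_json _
  unfold Spec_find_table_related_objects_py find_table_related_objects_py find_table_related_objects_py_alt
  rw [PySem.Set.ofList_eq_foldl, pv_foldl_flatMap]
  apply PySem.List.foldl_congr_mem
  intro acc p _
  unfold pvBGroup
  by_cases h1 : (PySem.Str.endswith p.1 "Table" || PySem.Str.endswith p.1 "Entry") = true
  · simp only [h1, if_pos, List.foldl_cons]
    by_cases h2 : PySem.Str.endswith p.1 "Entry" = true
    · simp only [h2, if_pos]
      exact pv_scan_eq _ _ _
    · simp only [h2, Bool.false_eq_true, if_neg, not_false_eq_true, List.foldl_nil]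
  · simp only [h1, Bool.false_eq_true, if_neg, not_false_eq_true, List.foldl_nil]
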